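-- pv_equiv track=rewrite | github.com/breaulta/AT_communicator | pack_and_convert_gsm7.py | gsm_decode
-- ===== SOURCE A (Python) =====
-- gsm = (u"@£$¥èéùìòÇ\nØø\rÅåΔ_ΦΓΛΩΠΨΣΘΞ\x1bÆæßÉ !\"#¤%&'()*+,-./0123456789:;<=>"
--    u"?¡ABCDEFGHIJKLMNOPQRSTUVWXYZÄÖÑÜ`¿abcdefghijklmnopqrstuvwxyzäöñüà")
--
-- ext = (u"````````````````````^```````````````````{}`````\\````````````[~]`"
--    u"|````````````````````````````````````€``````````````````````````")
--
-- def chunks(l, n):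
--     if n < 1:
--         n = 1
--     return [l[i:i + n] for i in range(0, len(l), n)]
--
-- def gsm_decode(codedtext):
--     hexparts = chunks(codedtext, 2)
--     number   = 0
--     bitcount = 0
--     output   = ''
--     found_external = False
--     for byte in hexparts:
--         byte = int(byte, 16);
--         # add data on to the end
--         number = number + (byte << bitcount) #left shift (<<) adds a preceeding zero
--         # increase the counter
--         bitcount = bitcount + 1
--         # output the first 7 bits
--         if number % 128 == 27:	# Using mod of 128 to overflow after 7 bits.
--              '''skip'''
--              found_external = True
--         else:
--             if found_external == True:
--                  character = ext[number % 128]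
--                  found_external = False
--             else:
--                  character = gsm[number % 128]
--             output = output + character
--
--         # then throw them away
--         number = number >> 7
--         # every 7th letter you have an extra one in the buffer
--         if bitcount == 7:
--             if number % 128 == 27:
--                 '''skip'''
--                 found_external = True
--             else:
--                 if found_external == True:
--                     character = ext[number % 128]
--                     found_external = False
--                 else:
--                     character = gsm[number % 128]
--                 output = output + character
--
--             bitcount = 0
--             number = 0
--     return output
-- ===== SOURCE B (Python) =====
-- gsm = (u"@£$¥èéùìòÇ\nØø\rÅåΔ_ΦΓΛΩΠΨΣΘΞ\x1bÆæßÉ !\"#¤%&'()*+,-./0123456789:;<=>"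
--    u"?¡ABCDEFGHIJKLMNOPQRSTUVWXYZÄÖÑÜ`¿abcdefghijklmnopqrstuvwxyzäöñüà")
--
-- ext = (u"````````````````````^```````````````````{}`````\\````````````[~]`"
--    u"|````````````````````````````````````€``````````````````````````")
--
-- def gsm_decode(codedtext):
--     hexparts = [codedtext[i:i + 2] for i in range(0, len(codedtext), 2)]
--     # Phase 1: accumulate all bytes into one little-endian integer.
--     bits = 0
--     shift = 0
--     for chunk in hexparts:
--         bits += int(chunk, 16) << shift
--         shift += 8
--     # Phase 2/3: slice out each septet and apply the escape table.
--     nbytes = len(hexparts)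
--     n_sept = nbytes + nbytes // 7
--     out = []
--     esc = False
--     for i in range(n_sept):
--         v = (bits >> (7 * i)) & 127
--         if v == 27:
--             esc = True
--         elif esc:
--             out.append(ext[v])
--             esc = False
--         else:
--             out.append(gsm[v])
--     return ''.join(out)
-- ===== Notes on version B (the rewrite author's own statement) =====
-- stated objective: alternative
-- what changed: A streams each byte through a 7-bit window (number/bitcount with a reset every 7 bytes); B accumulates all bytes into one little-endian big integer and slices out the nbytes + nbytes//7 septets with shifts and masks, then applies the escape table in a separate pass.
-- outside the precondition, e.g. on gsm_decode('000000000000-100'): A returns '@@@@@@¡à@', B returns '@@@@@@¡àà'; on gsm_decode('-1'): A returns 'à', B returns 'à'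
import Mathlib
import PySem

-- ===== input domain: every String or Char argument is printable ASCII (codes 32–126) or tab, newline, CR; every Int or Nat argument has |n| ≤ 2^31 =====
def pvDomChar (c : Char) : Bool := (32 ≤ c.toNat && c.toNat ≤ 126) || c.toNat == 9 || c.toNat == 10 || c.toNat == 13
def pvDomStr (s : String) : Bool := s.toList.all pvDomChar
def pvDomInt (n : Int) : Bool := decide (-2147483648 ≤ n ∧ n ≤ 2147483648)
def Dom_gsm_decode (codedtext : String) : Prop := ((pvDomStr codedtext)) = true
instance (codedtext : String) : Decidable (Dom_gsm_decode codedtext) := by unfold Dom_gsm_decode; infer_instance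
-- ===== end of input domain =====

-- B replaces A's streaming 7-bit window (number/bitcount with a reset every 7 bytes) by
-- whole-integer slicing: all bytes are accumulated into one little-endian integer and the
-- nbytes + nbytes//7 septets are sliced out of it; objective: alternative (not faster).

-- the GSM 03.38 default alphabet and its escape table (module constants of A)
def pvGsmTab : List Char :=
  "@£$¥èéùìòÇ\nØø\rÅåΔ_ΦΓΛΩΠΨΣΘΞ\x1bÆæßÉ !\"#¤%&'()*+,-./0123456789:;<=>?¡ABCDEFGHIJKLMNOPQRSTUVWXYZÄÖÑÜ`¿abcdefghijklmnopqrstuvwxyzäöñüà".toList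
def pvExtTab : List Char :=
  "````````````````````^```````````````````{}`````\\````````````[~]`|````````````````````````````````````€``````````````````````````".toList

-- int(chunk, 16); `none` (Python ValueError) is excluded by Pre_, the default is never used there
def pvParse (chunk : List Char) : Int := (PySem.Int.ofCharsBase? chunk 16).getD 0

-- ===== PORT A =====
-- helper chunks(l, n) of A
def pvChunksA (l : List Char) (n : Int) : List (List Char) :=
  let n := if n < 1 then 1 else n
  (PySem.List.pyRange 0 (l.length : Int) n).map
    (fun i => PySem.List.slice l (some i) (some (i + n)))

-- A's loop body; state = (number, bitcount, output, found_external); bitcount is a Nat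
-- (in A it is a Python int that stays in 0..7; Nat is used because `<<<` takes a Nat shift)
def pvStepA (st : Int × Nat × List Char × Bool) (chunk : List Char) :
    Int × Nat × List Char × Bool :=
  let byte := pvParse chunk
  let number := st.1 + (byte <<< st.2.1)
  let bitcount := st.2.1 + 1
  let of1 :=
    if PySem.Int.mod number 128 = 27 then (st.2.2.1, true)
    else if st.2.2.2 = true then
      (st.2.2.1 ++ [PySem.List.pyGetD pvExtTab (PySem.Int.mod number 128) '`'], false)
    else
      (st.2.2.1 ++ [PySem.List.pyGetD pvGsmTab (PySem.Int.mod number 128) '`'], false)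
  let number2 := number >>> (7 : Nat)
  if bitcount = 7 then
    let of2 :=
      if PySem.Int.mod number2 128 = 27 then (of1.1, true)
      else if of1.2 = true then
        (of1.1 ++ [PySem.List.pyGetD pvExtTab (PySem.Int.mod number2 128) '`'], false)
      else
        (of1.1 ++ [PySem.List.pyGetD pvGsmTab (PySem.Int.mod number2 128) '`'], false)
    (0, 0, of2.1, of2.2)
  else (number2, bitcount, of1.1, of1.2)

def gsm_decode (codedtext : String) : String :=
  let hexparts := pvChunksA codedtext.toList 2
  let st := hexparts.foldl pvStepA (0, 0, [], false)
  String.mk st.2.2.1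

-- ===== PORT B =====
-- B's escape/table step (the body of B's phase-3 loop, given the septet value v)
def pvEscStepB (st : List Char × Bool) (v : Int) : List Char × Bool :=
  if v = 27 then (st.1, true)
  else if st.2 = true then (st.1 ++ [PySem.List.pyGetD pvExtTab v '`'], false)
  else (st.1 ++ [PySem.List.pyGetD pvGsmTab v '`'], false)

def gsm_decode_alt (codedtext : String) : String :=
  let hexparts := (PySem.List.pyRange 0 (codedtext.toList.length : Int) 2).map
    (fun i => PySem.List.slice codedtext.toList (some i) (some (i + 2)))
  -- Phase 1: accumulate all bytes into one little-endian integer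
  let bits := (hexparts.foldl
    (fun (p : Int × Nat) chunk => (p.1 + (pvParse chunk <<< p.2), p.2 + 8)) (0, 0)).1
  -- Phase 2/3: slice out each septet and apply the escape table
  let nbytes := hexparts.length
  let nsept := nbytes + nbytes / 7
  let st := (List.range nsept).foldl
    (fun st (i : Nat) => pvEscStepB st (PySem.Int.band (bits >>> ((7 * i : Nat))) 127))
    (([] : List Char), false)
  String.mk st.1

-- ===== PRECONDITION & SPEC =====
-- Pre_ requires every 2-character chunk to be a valid base-16 literal of value in [0, 256).
-- It excludes the inputs where int(chunk, 16) raises ValueError (A raises there), and the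
-- negatively-signed chunks such as "-1" that Python's int() accidentally accepts: there A
-- still returns, but its value past a 7-byte group boundary is an artefact of A discarding
-- the borrow when it resets its buffer (a corner no caller of a hex decoder would specify).
-- The bound v < 256 is automatic for every unsigned chunk of at most two hex digits, so it
-- excludes nothing further.
def Pre_gsm_decode (codedtext : String) : Prop :=
  (((PySem.List.pyRange 0 (codedtext.toList.length : Int) 2).map
      (fun i => PySem.List.slice codedtext.toList (some i) (some (i + 2)))).all
    (fun c => (PySem.Int.ofCharsBase? c 16).any (fun v => decide (0 ≤ v ∧ v < 256)))) = true
instance (codedtext : String) : Decidable (Pre_gsm_decode codedtext) := by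
  unfold Pre_gsm_decode; infer_instance

def pvWitness_gsm_decode : String := "E8329BFD06"

def Spec_gsm_decode (codedtext : String) (out : String) : Prop := out = gsm_decode_alt codedtext
instance (codedtext : String) (out : String) : Decidable (Spec_gsm_decode codedtext out) := by
  unfold Spec_gsm_decode; infer_instance

-- ===== CLAIM (what is proved, stated in full; the proofs are below) =====
def Claim_equal_gsm_decode : Prop := ∀ (codedtext : String), Dom_gsm_decode codedtext → Pre_gsm_decode codedtext → Spec_gsm_decode codedtext (gsm_decode codedtext)

-- ===== LEMMAS AND PROOFS =====

-- the little-endian byte accumulator, recursively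
def pvSZ : List Int → Int
  | [] => 0
  | b :: bs => b + 256 * pvSZ bs

-- the septet stream A's streaming loop produces from a byte list (state: buffer, bit counter)
def pvSepA : Int → Nat → List Int → List Int
  | _, _, [] => []
  | n, bc, b :: bs =>
    let n1 := n + (b <<< bc)
    if bc + 1 = 7 then
      PySem.Int.mod n1 128 :: PySem.Int.mod (n1 >>> (7 : Nat)) 128 :: pvSepA 0 0 bs
    else
      PySem.Int.mod n1 128 :: pvSepA (n1 >>> (7 : Nat)) (bc + 1) bs

-- septet i of the whole-integer S
def pvF (S : Int) (i : Nat) : Int := (S / 2 ^ (7 * i)) % 128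

lemma pvStepA_eq (st : Int × Nat × List Char × Bool) (chunk : List Char) :
    pvStepA st chunk =
      if st.2.1 + 1 = 7 then
        ((0 : Int), (0 : Nat),
          (pvEscStepB (pvEscStepB (st.2.2.1, st.2.2.2)
              (PySem.Int.mod (st.1 + (pvParse chunk <<< st.2.1)) 128))
            (PySem.Int.mod ((st.1 + (pvParse chunk <<< st.2.1)) >>> (7 : Nat)) 128)).1,
          (pvEscStepB (pvEscStepB (st.2.2.1, st.2.2.2)
              (PySem.Int.mod (st.1 + (pvParse chunk <<< st.2.1)) 128))
            (PySem.Int.mod ((st.1 + (pvParse chunk <<< st.2.1)) >>> (7 : Nat)) 128)).2)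
      else
        ((st.1 + (pvParse chunk <<< st.2.1)) >>> (7 : Nat), st.2.1 + 1,
          (pvEscStepB (st.2.2.1, st.2.2.2)
            (PySem.Int.mod (st.1 + (pvParse chunk <<< st.2.1)) 128)).1,
          (pvEscStepB (st.2.2.1, st.2.2.2)
            (PySem.Int.mod (st.1 + (pvParse chunk <<< st.2.1)) 128)).2) := rfl

-- A's whole fold = escape-fold over the septet stream
lemma pvFoldA_out (chs : List (List Char)) : ∀ (n : Int) (bc : Nat) (p : List Char × Bool),
    (chs.foldl pvStepA (n, bc, p.1, p.2)).2.2.1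
      = ((pvSepA n bc (chs.map pvParse)).foldl pvEscStepB p).1 := by
  induction chs with
  | nil => intro n bc p; simp [pvSepA]
  | cons c chs ih =>
    intro n bc p
    rw [List.foldl_cons, pvStepA_eq]
    by_cases h7 : bc + 1 = 7 <;>
      simp only [h7, if_true, if_false, List.map_cons, pvSepA, List.foldl_cons] <;>
      [exact ih 0 0 _; exact ih _ _ _]

-- B's phase-1 fold computes pvSZ
lemma pvBits_eq (chs : List (List Char)) : ∀ (acc : Int) (k : Nat),
    (chs.foldl (fun (p : Int × Nat) chunk => (p.1 + (pvParse chunk <<< p.2), p.2 + 8)) (acc, k)).1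
      = acc + pvSZ (chs.map pvParse) * 2 ^ k := by
  induction chs with
  | nil => intro acc k; simp [pvSZ]
  | cons c chs ih =>
    intro acc k
    rw [List.foldl_cons, ih]
    simp only [List.map_cons, pvSZ, Int.shiftLeft_eq, pow_add]
    ring

lemma pvShiftR (a : Int) (k : Nat) (h : 0 ≤ a) : a >>> k = a / 2 ^ k := by
  rcases Int.le.dest h with ⟨m, rfl⟩
  simp [Int.shiftRight_eq_div_pow]

lemma pvMod128 (a : Int) : PySem.Int.mod a 128 = a % 128 :=
  PySem.Int.mod_eq_emod_of_pos (by norm_num)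

lemma pvBand127 (a : Int) (h : 0 ≤ a) : PySem.Int.band a 127 = a % 128 := by
  rw [PySem.Int.band_of_nonneg h (by norm_num)]
  rcases Int.le.dest h with ⟨m, rfl⟩
  simp only [zero_add, Int.toNat_natCast]
  rw [show ((127 : Int).toNat) = 2 ^ 7 - 1 from rfl, Nat.and_two_pow_sub_one_eq_mod]
  push_cast
  norm_num

lemma pvSZ_bounds (bs : List Int) (h : ∀ b ∈ bs, 0 ≤ b ∧ b < 256) :
    0 ≤ pvSZ bs ∧ pvSZ bs < 2 ^ (8 * bs.length) := by
  induction bs with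
  | nil => simp [pvSZ]
  | cons b bs ih =>
    obtain ⟨h0, h1⟩ := h b (by simp)
    obtain ⟨ih0, ih1⟩ := ih (fun x hx => h x (by simp [hx]))
    constructor
    · simp only [pvSZ]; positivity
    · have : (2 : Int) ^ (8 * (b :: bs).length) = 256 * 2 ^ (8 * bs.length) := by
        simp only [List.length_cons]
        rw [Nat.mul_add, Nat.mul_one, pow_add]
        ring
      rw [this]
      simp only [pvSZ]
      nlinarith

lemma pvSZ_append (c rest : List Int) :
    pvSZ (c ++ rest) = pvSZ c + pvSZ rest * 2 ^ (8 * c.length) := by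
  induction c with
  | nil => simp [pvSZ]
  | cons b c ih =>
    simp only [List.cons_append, pvSZ, ih, List.length_cons]
    rw [Nat.mul_add, Nat.mul_one, pow_add]
    ring

-- septet i < 8k/7 of S ignores anything added at or above bit 8k
lemma pvF_highAdd (S H : Int) (k i : Nat) (h : 7 * i + 7 ≤ 8 * k) :
    pvF (S + H * 2 ^ (8 * k)) i = pvF S i := by
  have e : 8 * k - (7 * i + 7) + (7 * i + 7) = 8 * k := by omega
  have hterm : H * 2 ^ (8 * k) = ((H * 2 ^ (8 * k - (7 * i + 7))) * 128) * 2 ^ (7 * i) := by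
    rw [← e, pow_add, pow_add]
    norm_num
    ring
  unfold pvF
  rw [hterm, Int.add_mul_ediv_right _ _ (show (2:Int) ^ (7 * i) ≠ 0 by positivity),
    Int.add_mul_emod_self_right]

-- septets from index 8 on read only the part of S above bit 56
lemma pvF_shift (L H : Int) (i : Nat) (h0 : 0 ≤ L) (h1 : L < 2 ^ 56) :
    pvF (L + H * 2 ^ 56) (8 + i) = pvF H i := by
  unfold pvF
  rw [show 7 * (8 + i) = 56 + 7 * i by ring, pow_add,
    ← Int.ediv_ediv_of_nonneg (show (0:Int) ≤ 2 ^ 56 by positivity),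
    Int.add_mul_ediv_right _ _ (show (2:Int) ^ 56 ≠ 0 by positivity),
    Int.ediv_eq_zero_of_lt h0 h1, zero_add]

lemma pvRangeSucc_map (f : Nat → Int) (m : Nat) :
    (List.range (m + 1)).map f = f 0 :: (List.range m).map (fun i => f (i + 1)) := by
  rw [List.range_succ_eq_map]
  simp [Function.comp_def]

-- a full 7-byte group: A emits 8 septets and resets; they are slices of the group integer
lemma pvSepA_full (c : List Int) : ∀ (rest : List Int) (j : Nat) (P : Int),
    c ≠ [] → (∀ b ∈ c, 0 ≤ b ∧ b < 256) → 0 ≤ P → P < 2 ^ (8 * j) → j + c.length = 7 →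
    pvSepA (P / 2 ^ (7 * j)) j (c ++ rest)
      = (List.range (c.length + 1)).map (fun i => pvF (P + pvSZ c * 2 ^ (8 * j)) (j + i))
        ++ pvSepA 0 0 rest := by
  induction c with
  | nil => intro _ _ _ hne; exact absurd rfl hne
  | cons b c ih =>
    intro rest j P _ hb hP0 hP1 hlen
    obtain ⟨hb0, hb1⟩ := hb b (by simp)
    have hP'0 : 0 ≤ P + b * 2 ^ (8 * j) := by positivity
    have hP'1 : P + b * 2 ^ (8 * j) < 2 ^ (8 * (j + 1)) := by
      have : (2 : Int) ^ (8 * (j + 1)) = 256 * 2 ^ (8 * j) := by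
        rw [Nat.mul_add, Nat.mul_one, pow_add]; ring
      rw [this]; nlinarith
    have hstep : P / 2 ^ (7 * j) + (b <<< j) = (P + b * 2 ^ (8 * j)) / 2 ^ (7 * j) := by
      have h8 : b * 2 ^ (8 * j) = (b * 2 ^ j) * 2 ^ (7 * j) := by
        rw [show 8 * j = j + 7 * j by ring, pow_add]; ring
      rw [Int.shiftLeft_eq, h8, Int.add_mul_ediv_right _ _ (by positivity)]
    have hshift : ((P + b * 2 ^ (8 * j)) / 2 ^ (7 * j)) >>> (7 : Nat)
        = (P + b * 2 ^ (8 * j)) / 2 ^ (7 * (j + 1)) := by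
      rw [pvShiftR ((P + b * 2 ^ (8 * j)) / 2 ^ (7 * j)) 7
          (Int.ediv_nonneg hP'0 (by positivity)),
        Int.ediv_ediv_of_nonneg (by positivity), ← pow_add,
        show 7 * j + 7 = 7 * (j + 1) by ring]
    have hX : P + pvSZ (b :: c) * 2 ^ (8 * j)
        = (P + b * 2 ^ (8 * j)) + pvSZ c * 2 ^ (8 * (j + 1)) := by
      simp only [pvSZ]
      rw [Nat.mul_add, Nat.mul_one, pow_add]
      ring
    rcases c with _ | ⟨b2, c2⟩
    · -- last byte of the group: j = 6, emit septets 6 and 7, reset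
      have hj : j = 6 := by simp at hlen; omega
      subst hj
      have hSZb : pvSZ [b] = b := by simp [pvSZ]
      rw [List.cons_append, List.nil_append, pvSepA]
      simp only [hstep, hshift, hSZb]
      norm_num [pvF, pvMod128, List.range_succ]
    · -- interior byte: bc + 1 < 7, recurse
      have h7 : j + 1 ≠ 7 := by simp at hlen; omega
      rw [List.cons_append, pvSepA]
      simp only [hstep, hshift, if_neg h7]
      rw [ih rest (j + 1) (P + b * 2 ^ (8 * j)) (by simp) (fun x hx => hb x (by simp [hx]))
        hP'0 hP'1 (by simp at hlen ⊢; omega)]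
      simp only [List.length_cons]
      conv_rhs => rw [pvRangeSucc_map]
      rw [List.cons_append]
      congr 1
      · rw [pvMod128, hX, pvF_highAdd _ _ _ _ (by omega)]
        simp [pvF]
      · congr 1
        apply List.map_congr_left
        intro i _
        rw [hX]
        congr 1
        omega

-- a trailing partial group (< 7 bytes): one septet per byte, no reset
lemma pvSepA_partial (c : List Int) : ∀ (j : Nat) (P : Int),
    (∀ b ∈ c, 0 ≤ b ∧ b < 256) → 0 ≤ P → P < 2 ^ (8 * j) → j + c.length ≤ 6 →
    pvSepA (P / 2 ^ (7 * j)) j c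
      = (List.range c.length).map (fun i => pvF (P + pvSZ c * 2 ^ (8 * j)) (j + i)) := by
  induction c with
  | nil => intro j P _ _ _ _; simp [pvSepA]
  | cons b c ih =>
    intro j P hb hP0 hP1 hlen
    obtain ⟨hb0, hb1⟩ := hb b (by simp)
    have hP'0 : 0 ≤ P + b * 2 ^ (8 * j) := by positivity
    have hP'1 : P + b * 2 ^ (8 * j) < 2 ^ (8 * (j + 1)) := by
      have : (2 : Int) ^ (8 * (j + 1)) = 256 * 2 ^ (8 * j) := by
        rw [Nat.mul_add, Nat.mul_one, pow_add]; ring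
      rw [this]; nlinarith
    have hstep : P / 2 ^ (7 * j) + (b <<< j) = (P + b * 2 ^ (8 * j)) / 2 ^ (7 * j) := by
      have h8 : b * 2 ^ (8 * j) = (b * 2 ^ j) * 2 ^ (7 * j) := by
        rw [show 8 * j = j + 7 * j by ring, pow_add]; ring
      rw [Int.shiftLeft_eq, h8, Int.add_mul_ediv_right _ _ (by positivity)]
    have hshift : ((P + b * 2 ^ (8 * j)) / 2 ^ (7 * j)) >>> (7 : Nat)
        = (P + b * 2 ^ (8 * j)) / 2 ^ (7 * (j + 1)) := by
      rw [pvShiftR ((P + b * 2 ^ (8 * j)) / 2 ^ (7 * j)) 7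
          (Int.ediv_nonneg hP'0 (by positivity)),
        Int.ediv_ediv_of_nonneg (by positivity), ← pow_add,
        show 7 * j + 7 = 7 * (j + 1) by ring]
    have hX : P + pvSZ (b :: c) * 2 ^ (8 * j)
        = (P + b * 2 ^ (8 * j)) + pvSZ c * 2 ^ (8 * (j + 1)) := by
      simp only [pvSZ]
      rw [Nat.mul_add, Nat.mul_one, pow_add]
      ring
    have h7 : j + 1 ≠ 7 := by simp at hlen; omega
    rw [pvSepA]
    simp only [hstep, hshift, if_neg h7]
    rw [ih (j + 1) (P + b * 2 ^ (8 * j)) (fun x hx => hb x (by simp [hx])) hP'0 hP'1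
      (by simp at hlen ⊢; omega)]
    simp only [List.length_cons]
    conv_rhs => rw [pvRangeSucc_map]
    congr 1
    · rw [pvMod128, hX, pvF_highAdd _ _ _ _ (by omega)]
      simp [pvF]
    · apply List.map_congr_left
      intro i _
      rw [hX]
      congr 1
      omega

-- the crux: A's streaming septets are exactly the nbytes + nbytes//7 slices of pvSZ
lemma pvSepA_eq (bs : List Int) (h : ∀ b ∈ bs, 0 ≤ b ∧ b < 256) :
    pvSepA 0 0 bs
      = (List.range (bs.length + bs.length / 7)).map (fun i => pvF (pvSZ bs) i) := by
  by_cases hl : bs.length ≤ 6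
  · have := pvSepA_partial bs 0 0 h le_rfl (by norm_num) (by omega)
    simp only [Int.zero_ediv, zero_add] at this
    rw [Nat.div_eq_of_lt (by omega)]
    simpa using this
  · have hsplit : bs.take 7 ++ bs.drop 7 = bs := List.take_append_drop 7 bs
    have hlen7 : (bs.take 7).length = 7 := by simp; omega
    have hbt : ∀ b ∈ bs.take 7, 0 ≤ b ∧ b < 256 :=
      fun b hb => h b (List.mem_of_mem_take hb)
    have hbd : ∀ b ∈ bs.drop 7, 0 ≤ b ∧ b < 256 :=
      fun b hb => h b (List.mem_of_mem_drop hb)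
    have hrec := pvSepA_eq (bs.drop 7) hbd
    have hfull := pvSepA_full (bs.take 7) (bs.drop 7) 0 0
      (by intro hc; rw [hc] at hlen7; simp at hlen7) hbt le_rfl (by norm_num) (by omega)
    simp only [Nat.mul_zero, pow_zero, Int.zero_ediv, mul_one, zero_add,
      hsplit, hlen7] at hfull
    rw [hfull, hrec]
    have hSZ : pvSZ bs = pvSZ (bs.take 7) + pvSZ (bs.drop 7) * 2 ^ 56 := by
      conv_lhs => rw [← hsplit]
      rw [pvSZ_append, hlen7]
    obtain ⟨hL0, hL1⟩ := pvSZ_bounds (bs.take 7) hbt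
    rw [hlen7] at hL1
    have hL1' : pvSZ (bs.take 7) < 2 ^ 56 := by simpa using hL1
    have hnum : bs.length + bs.length / 7
        = (7 + 1) + ((bs.drop 7).length + (bs.drop 7).length / 7) := by
      simp only [List.length_drop]
      omega
    rw [hnum]
    conv_rhs => rw [List.range_add, List.map_append, List.map_map]
    congr 1
    · apply List.map_congr_left
      intro i hi
      simp only [List.mem_range] at hi
      rw [hSZ, show (2 : Int) ^ 56 = 2 ^ (8 * 7) by norm_num,
        pvF_highAdd _ _ 7 i (by omega)]
    · apply List.map_congr_left
      intro i _
      simp only [Function.comp_apply]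
      rw [hSZ, show 7 + 1 + i = 8 + i by norm_num, pvF_shift _ _ _ hL0 hL1']
termination_by bs.length
decreasing_by simp; omega

-- A's chunks helper, applied at n = 2, is B's chunk comprehension
lemma pvChunksA_two (l : List Char) :
    pvChunksA l 2 = (PySem.List.pyRange 0 (l.length : Int) 2).map
      (fun i => PySem.List.slice l (some i) (some (i + 2))) := by
  norm_num [pvChunksA]

-- ===== VERDICT (by name: the statement is the Claim_ definition above) =====
theorem gsm_decode_spec : Claim_equal_gsm_decode := by
  intro s _ hpre
  unfold Spec_gsm_decode gsm_decode gsm_decode_alt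
  rw [pvChunksA_two]
  set hexparts := (PySem.List.pyRange 0 (s.toList.length : Int) 2).map
    (fun i => PySem.List.slice s.toList (some i) (some (i + 2))) with hhex
  -- byte bounds from Pre_
  have hbounds : ∀ b ∈ hexparts.map pvParse, 0 ≤ b ∧ b < 256 := by
    intro b hb
    rw [List.mem_map] at hb
    obtain ⟨c, hc, rfl⟩ := hb
    unfold Pre_gsm_decode at hpre
    rw [← hhex, List.all_eq_true] at hpre
    have := hpre c hc
    cases ho : PySem.Int.ofCharsBase? c 16 with
    | none => rw [ho] at this; simp [Option.any] at this
    | some v =>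
      rw [ho] at this
      simp only [Option.any, decide_eq_true_eq] at this
      simpa [pvParse, ho] using this
  -- A's side
  simp only
  rw [pvFoldA_out hexparts 0 0 ([], false)]
  -- B's side: bits = pvSZ bytes
  rw [pvBits_eq hexparts 0 0]
  simp only [pow_zero, mul_one, zero_add]
  set bytes := hexparts.map pvParse with hbytes
  have hS0 : 0 ≤ pvSZ bytes := (pvSZ_bounds bytes hbounds).1
  -- B's range fold = escape-fold over the mapped septets
  have hB : List.foldl
      (fun st (i : Nat) => pvEscStepB st (PySem.Int.band (pvSZ bytes >>> ((7 * i : Nat))) 127))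
      (([] : List Char), false) (List.range (hexparts.length + hexparts.length / 7))
      = List.foldl pvEscStepB (([] : List Char), false)
        ((List.range (hexparts.length + hexparts.length / 7)).map
          (fun (i : Nat) => PySem.Int.band (pvSZ bytes >>> ((7 * i : Nat))) 127)) :=
    List.foldl_map.symm
  rw [hB]
  -- the two septet lists agree
  have hseps : (List.range (hexparts.length + hexparts.length / 7)).map
      (fun (i : Nat) => PySem.Int.band (pvSZ bytes >>> ((7 * i : Nat))) 127)
      = pvSepA 0 0 bytes := by
    rw [pvSepA_eq bytes hbounds]
    have hlen : bytes.length = hexparts.length := by simp [hbytes]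
    rw [← hlen]
    apply List.map_congr_left
    intro i _
    rw [pvShiftR _ _ hS0, pvBand127 _ (Int.ediv_nonneg hS0 (by positivity))]
    rfl
  rw [hseps]
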